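-- pv_equiv track=rewrite | github.com/christiaanjs/treeflow-paper | treeflow_pipeline/results.py | construct_precedes_map
-- ===== SOURCE A (Python) =====
-- def construct_precedes_map(
--     taxon_order,
-- ):  # [x, y] = True if x precedes y TODO: Do something that isn't quadratic
--     precedes = {}
--     for i in range(len(taxon_order)):
--         for j in range(i):
--             precedes[taxon_order[i], taxon_order[j]] = False
--         for j in range(i + 1, len(taxon_order)):
--             precedes[taxon_order[i], taxon_order[j]] = True
--     return precedes
-- ===== SOURCE B (Python) =====
-- def construct_precedes_map(taxon_order):
--     # Prefix/suffix decomposition: walk the list splitting it into the taxa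
--     # already seen (prefix) and those still to come (rest); emit each element's
--     # whole row as comprehensions and build the dict once from the item sequence.
--     items = []
--     prefix = []
--     rest = list(taxon_order)
--     while rest:
--         x = rest.pop(0)
--         items += [((x, y), False) for y in prefix]
--         items += [((x, y), True) for y in rest]
--         prefix.append(x)
--     return dict(items)
-- ===== Notes on version B (the rewrite author's own statement) =====
-- stated objective: alternative
-- what changed: Replaces A's index-based double loop of mutating dict inserts by an index-free prefix/suffix split walk that emits each element's whole row as list comprehensions and builds the dict once from the generated item sequence.
import Mathlib
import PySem

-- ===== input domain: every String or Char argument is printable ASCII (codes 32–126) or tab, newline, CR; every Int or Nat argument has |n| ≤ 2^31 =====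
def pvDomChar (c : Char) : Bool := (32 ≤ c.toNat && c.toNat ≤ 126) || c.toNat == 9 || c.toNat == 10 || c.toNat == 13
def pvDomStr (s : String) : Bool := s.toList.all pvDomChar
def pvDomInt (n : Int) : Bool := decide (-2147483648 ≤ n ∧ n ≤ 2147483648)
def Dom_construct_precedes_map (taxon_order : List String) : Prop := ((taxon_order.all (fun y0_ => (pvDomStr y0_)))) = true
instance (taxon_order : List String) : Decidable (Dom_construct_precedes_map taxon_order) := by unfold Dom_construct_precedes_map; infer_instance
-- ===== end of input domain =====

-- B replaces A's index-based double loop (mutating dict inserts) by a structural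
-- recursion over prefix/suffix splits that emits each element's row and builds the
-- dict once from the item sequence; alternative decomposition, same O(n^2) cost.

-- ===== PORT A =====
def construct_precedes_map (taxon_order : List String) : List (String × String × Bool) :=
  ((PySem.List.pyRange 0 (taxon_order.length : Int) 1).foldl
    (fun precedes i =>
      (PySem.List.pyRange (i + 1) (taxon_order.length : Int) 1).foldl
        (fun precedes j =>
          precedes.insert (PySem.List.pyGetD taxon_order i "", PySem.List.pyGetD taxon_order j "") true)
        ((PySem.List.pyRange 0 i 1).foldl
          (fun precedes j =>
            precedes.insert (PySem.List.pyGetD taxon_order i "", PySem.List.pyGetD taxon_order j "") false)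
          precedes))
    (PySem.Dict.empty : PySem.Dict (String × String) Bool)).items.map (fun p => (p.1.1, p.1.2, p.2))

-- ===== PORT B =====
def cpmLoop (items : List ((String × String) × Bool)) (pre rest : List String) :
    List ((String × String) × Bool) :=
  match rest with
  | [] => items
  | x :: rest =>
    cpmLoop (items ++ pre.map (fun y => ((x, y), false)) ++ rest.map (fun y => ((x, y), true)))
      (pre ++ [x]) rest

def construct_precedes_map_alt (taxon_order : List String) : List (String × String × Bool) :=
  (PySem.Dict.ofList (cpmLoop [] [] taxon_order)).items.map (fun p => (p.1.1, p.1.2, p.2))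

-- ===== PRECONDITION & SPEC =====
def Spec_construct_precedes_map (taxon_order : List String) (out : List (String × String × Bool)) : Prop := out = construct_precedes_map_alt taxon_order
instance (taxon_order : List String) (out : List (String × String × Bool)) : Decidable (Spec_construct_precedes_map taxon_order out) := by unfold Spec_construct_precedes_map; infer_instance

-- ===== CLAIM (what is proved, stated in full; the proofs are below) =====
def Claim_equal_construct_precedes_map : Prop := ∀ (taxon_order : List String), Dom_construct_precedes_map taxon_order → Spec_construct_precedes_map taxon_order (construct_precedes_map taxon_order)

-- ===== LEMMAS AND PROOFS =====

-- the item sequence cpmLoop generates, without its accumulator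
def cpmGen (pre suf : List String) : List ((String × String) × Bool) :=
  match suf with
  | [] => []
  | x :: rest =>
    (pre.map (fun y => ((x, y), false)) ++ rest.map (fun y => ((x, y), true)))
      ++ cpmGen (pre ++ [x]) rest

theorem cpmLoop_eq (suf : List String) : ∀ (items : List ((String × String) × Bool))
    (pre : List String), cpmLoop items pre suf = items ++ cpmGen pre suf := by
  induction suf with
  | nil => intro items pre; simp [cpmLoop, cpmGen]
  | cons x rest ih => intro items pre; simp [cpmLoop, cpmGen, ih]

-- sequential insertion of an item list into a dict
def cpmUpd (d : PySem.Dict (String × String) Bool) (l : List ((String × String) × Bool)) :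
    PySem.Dict (String × String) Bool :=
  l.foldl (fun d p => d.insert p.1 p.2) d

theorem cpmUpd_append (d : PySem.Dict (String × String) Bool)
    (l1 l2 : List ((String × String) × Bool)) :
    cpmUpd d (l1 ++ l2) = cpmUpd (cpmUpd d l1) l2 := by
  simp [cpmUpd, List.foldl_append]

theorem cpm_outer (t suf pre : List String) (d : PySem.Dict (String × String) Bool)
    (ht : t = pre ++ suf) :
    (PySem.List.pyRange (pre.length : Int) (t.length : Int) 1).foldl
      (fun precedes i =>
        (PySem.List.pyRange (i + 1) (t.length : Int) 1).foldl
          (fun precedes j =>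
            precedes.insert (PySem.List.pyGetD t i "", PySem.List.pyGetD t j "") true)
          ((PySem.List.pyRange 0 i 1).foldl
            (fun precedes j =>
              precedes.insert (PySem.List.pyGetD t i "", PySem.List.pyGetD t j "") false)
            precedes))
      d = cpmUpd d (cpmGen pre suf) := by
  induction suf generalizing pre d with
  | nil =>
    subst ht
    rw [PySem.List.pyRange_one_eq_nil (by simp)]
    simp [cpmGen, cpmUpd]
  | cons x rest ih =>
    subst ht
    have hlen : ((pre ++ x :: rest).length : Int) = (pre.length : Int) + 1 + rest.length := by
      simp; omega
    rw [PySem.List.pyRange_one_cons (by rw [hlen]; omega)]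
    rw [List.foldl_cons]
    -- the head element t[pre.length] = x
    have hx : PySem.List.pyGetD (pre ++ x :: rest) (pre.length : Int) "" = x := by
      rw [PySem.List.pyGetD_natCast]
      simp [List.getD_eq_getElem?_getD]
    -- inner loop 1 (j < i): inserts over the prefix
    have h1 : ∀ d, (PySem.List.pyRange 0 (pre.length : Int) 1).foldl
        (fun precedes j =>
          precedes.insert (PySem.List.pyGetD (pre ++ x :: rest) (pre.length : Int) "",
            PySem.List.pyGetD (pre ++ x :: rest) j "") false) d
        = cpmUpd d (pre.map (fun y => ((x, y), false))) := by
      intro d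
      rw [PySem.List.foldl_congr_mem _ _ (fun precedes j =>
          precedes.insert (x, PySem.List.pyGetD pre j "") false) d ?_]
      · rw [PySem.List.foldl_pyRange_zero_pyGetD' pre "" (fun d y => d.insert (x, y) false) d]
        simp [cpmUpd, List.foldl_map]
      · intro acc j hj
        rw [PySem.List.mem_pyRange_one] at hj
        rw [hx]
        obtain ⟨k, rfl⟩ : ∃ k : ℕ, j = (k : ℤ) := ⟨j.toNat, by omega⟩
        have hk : k < pre.length := by exact_mod_cast hj.2
        simp [PySem.List.pyGetD_natCast, List.getD_eq_getElem?_getD,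
          List.getElem?_append_left hk]
    -- inner loop 2 (j > i): inserts over the suffix
    have h2 : ∀ d, (PySem.List.pyRange ((pre.length : Int) + 1) (((pre ++ x :: rest).length : Int)) 1).foldl
        (fun precedes j =>
          precedes.insert (PySem.List.pyGetD (pre ++ x :: rest) (pre.length : Int) "",
            PySem.List.pyGetD (pre ++ x :: rest) j "") true) d
        = cpmUpd d (rest.map (fun y => ((x, y), true))) := by
      intro d
      simp only [hx]
      have hfold := PySem.List.foldl_pyRange_pyGetD' (pre ++ x :: rest) ""
        (fun acc y => acc.insert (x, y) true) d (a := (pre.length : Int) + 1) (add_nonneg (Int.natCast_nonneg _) zero_le_one)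
      rw [hfold]
      have hdrop : (pre ++ x :: rest).drop ((pre.length : Int) + 1).toNat = rest := by
        have h' : ((pre.length : Int) + 1).toNat = (pre ++ [x]).length := by simp
        rw [h', show pre ++ x :: rest = (pre ++ [x]) ++ rest by simp, List.drop_left]
      rw [hdrop]
      simp [cpmUpd, List.foldl_map]
    rw [h1, h2]
    have hsplit : pre ++ x :: rest = (pre ++ [x]) ++ rest := by simp
    have ihx := ih (pre ++ [x])
      (cpmUpd d (pre.map (fun y => ((x, y), false)) ++ rest.map (fun y => ((x, y), true)))) hsplit
    have hl : ((pre ++ [x]).length : Int) = (pre.length : Int) + 1 := by simp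
    rw [hl] at ihx
    rw [show cpmGen pre (x :: rest) =
      (pre.map (fun y => ((x, y), false)) ++ rest.map (fun y => ((x, y), true)))
        ++ cpmGen (pre ++ [x]) rest from rfl]
    rw [cpmUpd_append, ← cpmUpd_append d (pre.map (fun y => ((x, y), false)))]
    exact ihx

-- ===== VERDICT (by name: the statement is the Claim_ definition above) =====
theorem construct_precedes_map_spec : Claim_equal_construct_precedes_map := by
  intro t _
  show construct_precedes_map t = construct_precedes_map_alt t
  unfold construct_precedes_map construct_precedes_map_alt
  have h := cpm_outer t t [] PySem.Dict.empty (by simp)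
  simp only [List.length_nil, Nat.cast_zero] at h
  rw [h]
  rw [cpmLoop_eq t [] [], List.nil_append]
  exact congrArg _ (congrArg _ (PySem.Dict.ext_iff.mpr rfl))
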